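-- pv_equiv track=rewrite | github.com/BruceChen07/AI-Law-Assistant | app/services/contract_audit_modules/memory_pipeline.py | _build_compact_whitelist
-- ===== SOURCE A (Python) =====
-- from typing import Dict, Any, List, Optional
--
-- def _build_compact_whitelist(evidence_items: List[Dict[str, Any]], limit: int = 40):
--     lines: List[str] = []
--     alias_to_cid: Dict[str, str] = {}
--     n = 0
--     for it in evidence_items:
--         cid = str(it.get("citation_id") or "").strip()
--         if not cid:
--             continue
--         law = str(it.get("law_title") or it.get("title") or "").strip()
--         article = str(it.get("article_no") or "").strip()
--         if not law or not article:
--             continue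
--         n += 1
--         alias = f"C{n}"
--         alias_to_cid[alias] = cid
--         lines.append(f"- {alias}: {law} {article}")
--         if n >= max(1, int(limit or 1)):
--             break
--     return "\n".join(lines), alias_to_cid
-- ===== SOURCE B (Python) =====
-- def _qualify(it):
--     cid = str(it.get("citation_id") or "").strip()
--     law = str(it.get("law_title") or it.get("title") or "").strip()
--     art = str(it.get("article_no") or "").strip()
--     return (cid, law, art) if cid and law and art else None
--
--
-- def _build_compact_whitelist(evidence_items, limit=40):
--     cap = max(1, int(limit or 1))
--     triples = [t for t in map(_qualify, evidence_items) if t is not None][:cap]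
--     alias_to_cid = {f"C{i + 1}": cid for i, (cid, _, _) in enumerate(triples)}
--     lines = [f"- C{i + 1}: {law} {art}" for i, (_, law, art) in enumerate(triples)]
--     return "\n".join(lines), alias_to_cid
-- ===== Notes on version B (the rewrite author's own statement) =====
-- stated objective: alternative
-- what changed: A's single emit-as-you-go loop with a running counter, in-place dict growth and an early break is replaced by a filter phase (map a qualifying-triple extractor over the items, drop the Nones, slice to the cap) followed by two enumerate passes that build the alias dict and the formatted lines from the truncated triple list.
import Mathlib
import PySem

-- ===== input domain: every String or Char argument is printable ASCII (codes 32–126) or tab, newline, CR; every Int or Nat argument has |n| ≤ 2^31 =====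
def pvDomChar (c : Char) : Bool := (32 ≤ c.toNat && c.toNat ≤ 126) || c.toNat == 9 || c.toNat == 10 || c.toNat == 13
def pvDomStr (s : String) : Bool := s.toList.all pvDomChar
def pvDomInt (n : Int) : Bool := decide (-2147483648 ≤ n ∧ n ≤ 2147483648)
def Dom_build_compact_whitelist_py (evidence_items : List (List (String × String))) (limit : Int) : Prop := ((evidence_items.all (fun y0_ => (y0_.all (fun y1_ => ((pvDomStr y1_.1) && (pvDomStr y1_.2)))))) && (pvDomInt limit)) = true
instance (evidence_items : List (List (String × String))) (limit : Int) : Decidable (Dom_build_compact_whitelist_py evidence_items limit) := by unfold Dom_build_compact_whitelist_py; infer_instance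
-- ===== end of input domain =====

-- B replaces A's single emit-as-you-go loop (with break and a running counter) by a
-- filter-then-slice pass followed by two enumerate passes for the dict and the lines
-- (objective: alternative decomposition; same return value).

-- ===== PORT A =====
-- A's for-loop over evidence_items with state (lines, alias_to_cid, n) and an early break.
-- `str(x or "")` on string-or-missing values: a present non-empty string stays, else "" (getD "" since "" or "" = "").
def buildWlLoopA (limit : Int) (items : List (List (String × String))) (lines : List String)
    (d : PySem.Dict String String) (n : Int) : List String × PySem.Dict String String :=
  match items with
  | [] => (lines, d)
  | it :: rest =>
    let cid := PySem.Str.strip ((it.lookup "citation_id").getD "")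
    if cid = "" then buildWlLoopA limit rest lines d n
    else
      let lt := (it.lookup "law_title").getD ""
      let law := PySem.Str.strip (if lt = "" then (it.lookup "title").getD "" else lt)
      let article := PySem.Str.strip ((it.lookup "article_no").getD "")
      if law = "" ∨ article = "" then buildWlLoopA limit rest lines d n
      else
        let n' := n + 1
        let al := "C" ++ PySem.Int.toStr n'
        let d' := d.insert al cid
        let lines' := lines ++ ["- " ++ al ++ ": " ++ law ++ " " ++ article]
        if n' ≥ max 1 (if limit = 0 then 1 else limit) then (lines', d')
        else buildWlLoopA limit rest lines' d' n'

def build_compact_whitelist_py (evidence_items : List (List (String × String))) (limit : Int) :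
    String × (List (String × String)) :=
  let r := buildWlLoopA limit evidence_items [] PySem.Dict.empty 0
  (PySem.Str.join "\n" r.1, r.2.items)

-- ===== PORT B =====
-- helper _qualify: the triple of cleaned fields, or none if any is empty
def pvQualify (it : List (String × String)) : Option (String × String × String) :=
  let cid := PySem.Str.strip ((it.lookup "citation_id").getD "")
  let lt := (it.lookup "law_title").getD ""
  let law := PySem.Str.strip (if lt = "" then (it.lookup "title").getD "" else lt)
  let art := PySem.Str.strip ((it.lookup "article_no").getD "")
  if cid ≠ "" ∧ law ≠ "" ∧ art ≠ "" then some (cid, law, art) else none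

def build_compact_whitelist_py_alt (evidence_items : List (List (String × String))) (limit : Int) :
    String × (List (String × String)) :=
  let cap : Int := max 1 (if limit = 0 then 1 else limit)
  -- [t for t in map(_qualify, …) if t is not None][:cap]; cap ≥ 1, so the slice is a take
  let triples := (evidence_items.filterMap pvQualify).take cap.toNat
  let alias_to_cid := (PySem.List.enumerate triples 0).foldl
    (fun d p => d.insert ("C" ++ PySem.Int.toStr (p.1 + 1)) p.2.1) PySem.Dict.empty
  let lines := (PySem.List.enumerate triples 0).map
    (fun p => "- C" ++ PySem.Int.toStr (p.1 + 1) ++ ": " ++ p.2.2.1 ++ " " ++ p.2.2.2)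
  (PySem.Str.join "\n" lines, alias_to_cid.items)

-- ===== PRECONDITION & SPEC =====
def Spec_build_compact_whitelist_py (evidence_items : List (List (String × String))) (limit : Int) (out : String × (List (String × String))) : Prop := out = build_compact_whitelist_py_alt evidence_items limit
instance (evidence_items : List (List (String × String))) (limit : Int) (out : String × (List (String × String))) : Decidable (Spec_build_compact_whitelist_py evidence_items limit out) := by unfold Spec_build_compact_whitelist_py; infer_instance

-- ===== CLAIM (what is proved, stated in full; the proofs are below) =====
def Claim_equal_build_compact_whitelist_py : Prop := ∀ (evidence_items : List (List (String × String))) (limit : Int), Dom_build_compact_whitelist_py evidence_items limit → Spec_build_compact_whitelist_py evidence_items limit (build_compact_whitelist_py evidence_items limit)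

-- ===== LEMMAS AND PROOFS =====

-- the lines and dict entries contributed by the triples ts when the counter starts at n
def wlLines (ts : List (String × String × String)) (n : Int) : List String :=
  (PySem.List.enumerate ts n).map
    (fun p => "- C" ++ PySem.Int.toStr (p.1 + 1) ++ ": " ++ p.2.2.1 ++ " " ++ p.2.2.2)

def wlDict (ts : List (String × String × String)) (n : Int) (d : PySem.Dict String String) :
    PySem.Dict String String :=
  (PySem.List.enumerate ts n).foldl
    (fun d p => d.insert ("C" ++ PySem.Int.toStr (p.1 + 1)) p.2.1) d

theorem pvDashC (s : String) : "- " ++ ("C" ++ s) = "- C" ++ s := by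
  rw [← String.append_assoc]
  rfl

set_option maxHeartbeats 1000000 in
theorem buildWlLoopA_eq (limit : Int) (items : List (List (String × String)))
    (lines : List String) (d : PySem.Dict String String) (n : Int)
    (h : n < max 1 (if limit = 0 then 1 else limit)) :
    buildWlLoopA limit items lines d n =
      (lines ++ wlLines ((items.filterMap pvQualify).take
          ((max 1 (if limit = 0 then 1 else limit) - n).toNat)) n,
       wlDict ((items.filterMap pvQualify).take
          ((max 1 (if limit = 0 then 1 else limit) - n).toNat)) n d) := by
  induction items generalizing lines d n with
  | nil => simp [buildWlLoopA, wlLines, wlDict]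
  | cons it rest ih =>
    set cap := max 1 (if limit = 0 then 1 else limit) with hcap
    clear_value cap
    simp only [buildWlLoopA, List.filterMap_cons]
    by_cases hc : PySem.Str.strip ((it.lookup "citation_id").getD "") = ""
    · have hq : pvQualify it = none := by
        simp [pvQualify, hc]
      rw [if_pos hc, hq, ih lines d n h]
    · rw [if_neg hc]
      by_cases hla : PySem.Str.strip
          (if (it.lookup "law_title").getD "" = "" then (it.lookup "title").getD ""
           else (it.lookup "law_title").getD "") = "" ∨
          PySem.Str.strip ((it.lookup "article_no").getD "") = ""
      · have hq : pvQualify it = none := by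
          simp only [pvQualify]
          rw [if_neg (fun hx => hla.elim (fun h1 => hx.2.1 h1) (fun h1 => hx.2.2 h1))]
        rw [if_pos hla, hq, ih lines d n h]
      · push_neg at hla
        have hq : pvQualify it = some
            (PySem.Str.strip ((it.lookup "citation_id").getD ""),
             PySem.Str.strip (if (it.lookup "law_title").getD "" = ""
               then (it.lookup "title").getD "" else (it.lookup "law_title").getD ""),
             PySem.Str.strip ((it.lookup "article_no").getD "")) := by
          simp only [pvQualify]
          rw [if_pos ⟨hc, hla.1, hla.2⟩]
        rw [if_neg (by push_neg; exact hla), hq]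
        have htake : (cap - n).toNat = ((cap - (n + 1)).toNat) + 1 := by omega
        rw [htake]
        simp only [List.take_succ_cons]
        rw [← hcap]
        by_cases hbr : n + 1 ≥ cap
        · have : (cap - (n + 1)).toNat = 0 := by omega
          rw [if_pos hbr, this]
          simp [wlLines, wlDict, PySem.List.enumerate, pvDashC]
        · push_neg at hbr
          rw [if_neg (not_le.mpr hbr), ih _ _ (n + 1) hbr]
          simp [wlLines, wlDict, PySem.List.enumerate_cons, List.append_assoc, pvDashC]

-- ===== VERDICT (by name: the statement is the Claim_ definition above) =====
theorem build_compact_whitelist_py_spec : Claim_equal_build_compact_whitelist_py := by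
  intro evidence_items limit _
  unfold Spec_build_compact_whitelist_py
  have hcap : (0 : Int) < max 1 (if limit = 0 then 1 else limit) := by
    by_cases h : limit = 0 <;> simp [h] <;> omega
  rw [build_compact_whitelist_py, build_compact_whitelist_py_alt,
      buildWlLoopA_eq limit evidence_items [] PySem.Dict.empty 0 hcap]
  simp [wlLines, wlDict]
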